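-- pv_equiv track=rewrite | github.com/EvanTam/NetTotal | frontEnd.py | extractStatistics
-- ===== SOURCE A (Python) =====
-- def extractStatistics(document):
--     doc_idx_to_key = list(document.keys())
--
--     frequency = dict()
--     occurrence = dict()
--     for doc_idx in range(len(doc_idx_to_key)):
--         for synset in document[doc_idx_to_key[doc_idx]]:
--             if synset in frequency:
--                 frequency[synset] += 1
--                 occurrence[synset].append(doc_idx)
--             else:
--                 frequency[synset] = 1
--                 occurrence[synset] = [doc_idx]
--     return (frequency, occurrence, doc_idx_to_key)
-- ===== SOURCE B (Python) =====
-- def extractStatistics(document):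
--     docs = list(document.values())
--     order = list(dict.fromkeys(s for syns in docs for s in syns))
--     occurrence = {s: [i for i, syns in enumerate(docs) for _ in range(syns.count(s))]
--                   for s in order}
--     frequency = {s: sum(syns.count(s) for syns in docs) for s in order}
--     return (frequency, occurrence, list(document.keys()))
-- ===== Notes on version B (the rewrite author's own statement) =====
-- stated objective: alternative
-- what changed: B first computes the first-occurrence-ordered list of distinct synsets, then builds each synset's occurrence list and frequency by independent per-synset scans of the documents using list.count (occurrences as repeated doc indices, frequency as a sum of counts), instead of A's single pass that increments/appends into two dicts maintained in lockstep.
import Mathlib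
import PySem

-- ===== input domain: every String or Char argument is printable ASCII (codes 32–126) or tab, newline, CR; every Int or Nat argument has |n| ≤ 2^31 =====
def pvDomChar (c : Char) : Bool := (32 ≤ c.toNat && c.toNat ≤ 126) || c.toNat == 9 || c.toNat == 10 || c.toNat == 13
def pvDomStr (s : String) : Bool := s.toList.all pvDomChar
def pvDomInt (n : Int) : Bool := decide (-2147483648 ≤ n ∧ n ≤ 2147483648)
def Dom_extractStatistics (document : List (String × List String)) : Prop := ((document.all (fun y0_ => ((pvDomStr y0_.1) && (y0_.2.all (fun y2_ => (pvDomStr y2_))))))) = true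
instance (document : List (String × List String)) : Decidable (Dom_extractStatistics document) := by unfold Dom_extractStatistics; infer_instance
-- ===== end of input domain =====

-- B recomputes the statistics per distinct synset (first-occurrence order) by independent
-- document scans with list.count, instead of A's single pass updating two dicts in lockstep
-- (alternative decomposition; not faster).


-- ===== PORT A =====
-- the document argument is a Python dict: PySem.Dict.ofList document models its construction
def extractStatistics (document : List (String × List String)) : (List (String × Int)) × (List (String × List Int)) × List String :=
  let d := PySem.Dict.ofList document
  let doc_idx_to_key := d.keys
  let st := (PySem.List.pyRange 0 (doc_idx_to_key.length : Int) 1).foldl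
    (fun st doc_idx =>
      (d.getD (PySem.List.pyGetD doc_idx_to_key doc_idx "") []).foldl
        (fun st2 synset =>
          if st2.1.contains synset then
            (st2.1.modify synset 0 (· + 1), st2.2.modify synset [] (· ++ [doc_idx]))
          else
            (st2.1.insert synset 1, st2.2.insert synset [doc_idx]))
        st)
    ((PySem.Dict.empty, PySem.Dict.empty) : PySem.Dict String Int × PySem.Dict String (List Int))
  (st.1.items, st.2.items, doc_idx_to_key)

-- ===== PORT B =====
-- order = list(dict.fromkeys(...)) is PySem.List.dedup of the flattened synsets; each dict
-- comprehension is keyed by the Nodup list 'order', so its items are that list mapped.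
def extractStatistics_alt (document : List (String × List String)) : (List (String × Int)) × (List (String × List Int)) × List String :=
  let d := PySem.Dict.ofList document
  let docs := d.values
  let order := PySem.List.dedup (docs.flatMap (fun syns => syns))
  let occurrence := order.map (fun s =>
    (s, (PySem.List.enumerate docs).flatMap (fun p => List.replicate (PySem.List.count p.2 s) p.1)))
  let frequency := order.map (fun s =>
    (s, (docs.map (fun syns => (PySem.List.count syns s : Int))).sum))
  (frequency, occurrence, d.keys)

-- ===== PRECONDITION & SPEC =====
def Spec_extractStatistics (document : List (String × List String)) (out : (List (String × Int)) × (List (String × List Int)) × List String) : Prop := out = extractStatistics_alt document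
instance (document : List (String × List String)) (out : (List (String × Int)) × (List (String × List Int)) × List String) : Decidable (Spec_extractStatistics document out) := by unfold Spec_extractStatistics; infer_instance

-- ===== CLAIM (what is proved, stated in full; the proofs are below) =====
def Claim_equal_extractStatistics : Prop := ∀ (document : List (String × List String)), Dom_extractStatistics document → Spec_extractStatistics document (extractStatistics document)

-- ===== LEMMAS AND PROOFS =====

def pvMapLen (p : String × List Int) : String × Int := (p.1, (p.2.length : Int))

lemma pvPyGetD_cons_of_one_le {α : Type} (x : α) (t : List α) (i : Int) (d : α) (h : 1 ≤ i) :
    PySem.List.pyGetD (x :: t) i d = PySem.List.pyGetD t (i - 1) d := by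
  rw [PySem.List.pyGetD_of_nonneg _ d (by omega), PySem.List.pyGetD_of_nonneg _ d (by omega)]
  have hk : i.toNat = (i - 1).toNat + 1 := by omega
  rw [hk, List.getD_cons_succ]

lemma pvFoldl_range_eq_enumerate {σ : Type} (xs : List String) (s : Int) (g : σ → Int → String → σ) (init : σ) :
    (PySem.List.pyRange s (s + (xs.length : Int)) 1).foldl
      (fun st i => g st i (PySem.List.pyGetD xs (i - s) "")) init
    = (PySem.List.enumerate xs s).foldl (fun st p => g st p.1 p.2) init := by
  induction xs generalizing s init with
  | nil =>
    have h0 : s + ((([] : List String).length : Nat) : Int) = s := by simp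
    rw [h0, PySem.List.pyRange_one_eq_nil le_rfl]
    rfl
  | cons x t ih =>
    rw [PySem.List.pyRange_one_cons (by simp only [List.length_cons]; push_cast; omega)]
    simp only [List.foldl_cons, PySem.List.enumerate_cons, sub_self]
    rw [show PySem.List.pyGetD (x :: t) 0 "" = x by
      rw [PySem.List.pyGetD_of_nonneg _ _ le_rfl]; rfl]
    rw [PySem.List.foldl_congr_mem _ _
      (fun st i => g st i (PySem.List.pyGetD t (i - (s + 1)) "")) _
      (by
        intro acc i hi
        have h1 : s + 1 ≤ i := (PySem.List.mem_pyRange_one.mp hi).1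
        rw [pvPyGetD_cons_of_one_le x t (i - s) "" (by omega),
          show i - s - 1 = i - (s + 1) by omega])]
    rw [show s + (((x :: t).length : Nat) : Int) = (s + 1) + (t.length : Int) by
      push_cast [List.length_cons]; omega]
    exact ih (s + 1) (g init s x)

lemma pvEnumerate_map {α β : Type} (f : α → β) (l : List α) (s : Int) :
    PySem.List.enumerate (l.map f) s = (PySem.List.enumerate l s).map (fun p => (p.1, f p.2)) := by
  induction l generalizing s with
  | nil => rfl
  | cons x t ih => simp [PySem.List.enumerate_cons, ih]

lemma pvSnd_mem_of_mem_enumerate {α : Type} {l : List α} {s : Int} {p : Int × α}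
    (h : p ∈ PySem.List.enumerate l s) : p.2 ∈ l := by
  induction l generalizing s with
  | nil => simp [PySem.List.enumerate] at h
  | cons x t ih =>
    rw [PySem.List.enumerate_cons] at h
    rcases List.mem_cons.mp h with h | h
    · subst h; exact List.mem_cons_self
    · exact List.mem_cons_of_mem _ (ih h)

lemma pvContains_mapLen (items : List (String × List Int)) (s : String) :
    (PySem.Dict.mk (items.map pvMapLen)).contains s = (PySem.Dict.mk items).contains s := by
  simp [PySem.Dict.contains, List.any_map, pvMapLen, Function.comp_def]

lemma pvGetD_mapLen (items : List (String × List Int)) (s : String) :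
    (PySem.Dict.mk (items.map pvMapLen)).getD s 0 = (((PySem.Dict.mk items).getD s []).length : Int) := by
  induction items with
  | nil => rfl
  | cons p t ih =>
    by_cases h : p.1 == s
    · simp [PySem.Dict.getD, PySem.Dict.get?, pvMapLen, h]
    · simpa [PySem.Dict.getD, PySem.Dict.get?, pvMapLen, h] using ih

lemma pvStep_eq (O : PySem.Dict String (List Int)) (i : Int) (s : String) :
    (if (PySem.Dict.mk (O.items.map pvMapLen)).contains s then
       ((PySem.Dict.mk (O.items.map pvMapLen)).modify s 0 (· + 1), O.modify s [] (· ++ [i]))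
     else ((PySem.Dict.mk (O.items.map pvMapLen)).insert s 1, O.insert s [i]))
    = (PySem.Dict.mk ((O.modify s [] (· ++ [i])).items.map pvMapLen), O.modify s [] (· ++ [i])) := by
  have hc := pvContains_mapLen O.items s
  cases hco : O.contains s with
  | false =>
    rw [hco] at hc
    have hgd := PySem.Dict.getD_of_not_contains O ([] : List Int) hco
    rw [if_neg (by simp [hc])]
    simp only [PySem.Dict.modify, hgd, List.nil_append]
    simp only [PySem.Dict.insert, hco, hc, Bool.false_eq_true, if_false]
    simp [pvMapLen]
  | true =>
    rw [hco] at hc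
    have hgd : (PySem.Dict.mk (O.items.map pvMapLen)).getD s 0 = ((O.getD s []).length : Int) :=
      pvGetD_mapLen O.items s
    rw [if_pos (by simp [hc])]
    simp only [PySem.Dict.modify, PySem.Dict.insert, hco, hc, if_true]
    refine Prod.ext ?_ rfl
    show PySem.Dict.mk _ = PySem.Dict.mk _
    congr 1
    rw [List.map_map, List.map_map]
    apply List.map_congr_left
    intro p _
    by_cases h : p.1 = s
    · subst h
      simp [pvMapLen, hgd]
    · simp [pvMapLen, h]

lemma pvInner_fold (l : List String) (i : Int) (O : PySem.Dict String (List Int)) :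
    l.foldl
      (fun st2 synset =>
        if st2.1.contains synset then
          (st2.1.modify synset 0 (· + 1), st2.2.modify synset [] (· ++ [i]))
        else
          (st2.1.insert synset 1, st2.2.insert synset [i]))
      (PySem.Dict.mk (O.items.map pvMapLen), O)
    = (PySem.Dict.mk ((l.foldl (fun o synset => o.modify synset [] (· ++ [i])) O).items.map pvMapLen),
       l.foldl (fun o synset => o.modify synset [] (· ++ [i])) O) := by
  induction l generalizing O with
  | nil => rfl
  | cons x t ih =>
    simp only [List.foldl_cons]
    rw [pvStep_eq O i x]
    exact ih (O.modify x [] (· ++ [i]))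

lemma pvOuter_fold (L : List (Int × (String × List String))) (O : PySem.Dict String (List Int)) :
    L.foldl
      (fun st p => p.2.2.foldl
        (fun st2 synset =>
          if st2.1.contains synset then
            (st2.1.modify synset 0 (· + 1), st2.2.modify synset [] (· ++ [p.1]))
          else
            (st2.1.insert synset 1, st2.2.insert synset [p.1]))
        st)
      (PySem.Dict.mk (O.items.map pvMapLen), O)
    = (PySem.Dict.mk ((L.foldl (fun o p => p.2.2.foldl (fun o synset => o.modify synset [] (· ++ [p.1])) o) O).items.map pvMapLen),
       L.foldl (fun o p => p.2.2.foldl (fun o synset => o.modify synset [] (· ++ [p.1])) o) O) := by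
  induction L generalizing O with
  | nil => rfl
  | cons q t ih =>
    simp only [List.foldl_cons]
    rw [pvInner_fold q.2.2 q.1 O]
    exact ih _

-- the per-key characterisation of the grouping fold
def pvOcc (P : List (Int × String)) (s : String) : List Int :=
  (P.filter (fun q => q.2 == s)).map (fun q => q.1)

def pvNew (P : List (Int × String)) (ks : List String) : List String :=
  (PySem.List.dedup (P.map (fun q => q.2))).filter (fun s => !ks.contains s)

lemma pvOcc_cons (i : Int) (x : String) (T : List (Int × String)) (s : String) :
    pvOcc ((i, x) :: T) s = if x = s then i :: pvOcc T s else pvOcc T s := by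
  simp only [pvOcc, List.filter_cons]
  by_cases h : x = s <;> simp [h]

lemma pvG_items (P : List (Int × String)) (O : PySem.Dict String (List Int)) (h : O.keys.Nodup) :
    (P.foldl (fun o q => o.modify q.2 [] (· ++ [q.1])) O).items
    = O.items.map (fun q => (q.1, q.2 ++ pvOcc P q.1))
      ++ (pvNew P O.keys).map (fun s => (s, pvOcc P s)) := by
  induction P generalizing O with
  | nil =>
    simp [pvOcc, pvNew, PySem.List.dedup, PySem.Set.ofList]
  | cons q T ih =>
    obtain ⟨i, s⟩ := q
    simp only [List.foldl_cons]
    have hdedup : PySem.List.dedup (((i, s) :: T).map (fun q => q.2))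
        = s :: (PySem.List.dedup (T.map (fun q => q.2))).filter (fun y => !(y == s)) := by
      simp only [List.map_cons]
      rw [PySem.List.dedup_eq_ofList, PySem.List.dedup_eq_ofList, PySem.Set.ofList_cons]
      rfl
    cases hc : O.contains s with
    | true =>
      have hsk : s ∈ O.keys := (PySem.Dict.contains_iff_mem_keys O s).mp hc
      have hitems : (O.modify s [] (· ++ [i])).items
          = O.items.map (fun p => if p.1 == s then (s, O.getD s [] ++ [i]) else p) := by
        simp only [PySem.Dict.modify]
        exact PySem.Dict.items_insert_of_contains O _ hc
      have hkeys : (O.modify s [] (· ++ [i])).keys = O.keys := by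
        simp only [PySem.Dict.keys, hitems, List.map_map]
        apply List.map_congr_left
        intro p _
        by_cases hps : p.1 = s <;> simp [hps]
      have hnd' : (O.modify s [] (· ++ [i])).keys.Nodup := by rw [hkeys]; exact h
      rw [ih _ hnd', hkeys, hitems, List.map_map]
      congr 1
      · -- updated-items part
        apply List.map_congr_left
        intro p hp
        by_cases hps : p.1 = s
        · have hval : O.getD s [] = p.2 := by
            have hmem : (s, p.2) ∈ O.items := by rw [← hps]; simpa using hp
            exact PySem.Dict.getD_of_mem_items O hmem h []
          simp only [Function.comp_apply, hps, beq_self_eq_true, if_true, hval,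
            pvOcc_cons, List.append_assoc, List.singleton_append]
        · simp only [Function.comp_apply, beq_iff_eq, hps, if_false, pvOcc_cons,
            if_neg (Ne.symm hps)]
      · -- fresh-keys part
        have hnew : pvNew ((i, s) :: T) O.keys = pvNew T O.keys := by
          simp only [pvNew, hdedup, List.filter_cons]
          have hcs : O.keys.contains s = true := by simp; exact hsk
          rw [if_neg (by rw [hcs]; simp), List.filter_filter]
          apply List.filter_congr
          intro y _
          cases hy : O.keys.contains y with
          | true => simp
          | false =>
            have : y ≠ s := fun hys => by rw [hys, hcs] at hy; cases hy
            simp [this]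
        rw [hnew]
        apply List.map_congr_left
        intro y hy
        have hys : y ≠ s := by
          intro hys
          have hyk := List.of_mem_filter hy
          rw [hys] at hyk
          simp at hyk
          exact hyk hsk
        rw [pvOcc_cons, if_neg (Ne.symm hys)]
    | false =>
      have hmod : O.modify s [] (· ++ [i]) = O.insert s [i] := by
        simp only [PySem.Dict.modify, PySem.Dict.getD_of_not_contains O _ hc, List.nil_append]
      have hitems : (O.modify s [] (· ++ [i])).items = O.items ++ [(s, [i])] := by
        rw [hmod]; exact PySem.Dict.items_insert_of_not_contains O _ hc
      have hkeys : (O.modify s [] (· ++ [i])).keys = O.keys ++ [s] := by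
        simp [PySem.Dict.keys, hitems]
      have hsnk : s ∉ O.keys := by
        intro hmem
        rw [(PySem.Dict.contains_iff_mem_keys O s).mpr hmem] at hc; cases hc
      have hnd' : (O.modify s [] (· ++ [i])).keys.Nodup := by
        rw [hkeys]
        exact List.Nodup.append h (List.nodup_singleton s) (by simpa using hsnk)
      rw [ih _ hnd', hkeys, hitems]
      have hnew : pvNew ((i, s) :: T) O.keys = s :: pvNew T (O.keys ++ [s]) := by
        simp only [pvNew, hdedup, List.filter_cons]
        have hcs : O.keys.contains s = false := by simp; exact hsnk
        rw [if_pos (by rw [hcs]; rfl), List.filter_filter]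
        congr 1
        apply List.filter_congr
        intro y _
        cases hy : decide (y = s) with
        | true => simp [of_decide_eq_true hy]
        | false => simp [of_decide_eq_false hy]
      rw [hnew, List.map_append, List.map_cons, List.map_nil, List.map_cons]
      rw [List.append_assoc, List.singleton_append]
      congr 1
      · apply List.map_congr_left
        intro p hp
        have hps : p.1 ≠ s := by
          intro hps
          exact hsnk (hps ▸ List.mem_map_of_mem hp)
        rw [pvOcc_cons, if_neg (Ne.symm hps)]
      · congr 1
        · simp [pvOcc_cons]
        · apply List.map_congr_left
          intro y hy
          have hys : y ≠ s := by
            have := List.of_mem_filter hy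
            simp only [List.contains_append, Bool.not_or, Bool.and_eq_true,
              Bool.not_eq_true'] at this
            simpa using this.2
          rw [pvOcc_cons, if_neg (Ne.symm hys)]

lemma pvRep (i : Int) (l : List String) (s : String) :
    ((l.map (fun x => (i, x))).filter (fun q => q.2 == s)).map (fun q => q.1)
    = List.replicate (PySem.List.count l s) i := by
  induction l with
  | nil => rfl
  | cons x t ih =>
    simp only [List.map_cons, List.filter_cons, PySem.List.count_eq, List.count_cons]
    by_cases h : x = s
    · subst h
      simp only [beq_self_eq_true, if_true, List.map_cons]
      rw [ih]
      simp only [PySem.List.count_eq]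
      rw [← List.replicate_succ, List.replicate_succ']
    · have : (x == s) = false := by simpa using h
      simp only [this, Bool.false_eq_true, if_false]
      rw [ih]
      simp [PySem.List.count_eq]

lemma pvOcc_flatMap (E : List (Int × List String)) (s : String) :
    pvOcc (E.flatMap (fun p => p.2.map (fun x => (p.1, x)))) s
    = E.flatMap (fun p => List.replicate (PySem.List.count p.2 s) p.1) := by
  induction E with
  | nil => rfl
  | cons p T ih =>
    simp only [List.flatMap_cons, pvOcc, List.filter_append, List.map_append] at *
    rw [ih, pvRep]

lemma pvLen_flatMap_rep (E : List (Int × List String)) (s : String) :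
    (((E.flatMap (fun p => List.replicate (PySem.List.count p.2 s) p.1)).length : Nat) : Int)
    = (E.map (fun p => (PySem.List.count p.2 s : Int))).sum := by
  induction E with
  | nil => rfl
  | cons p T ih =>
    simp only [List.flatMap_cons, List.length_append, List.length_replicate, List.map_cons,
      List.sum_cons]
    push_cast
    rw [ih]

lemma pvMap_snd_flatMap (E : List (Int × List String)) :
    (E.flatMap (fun p => p.2.map (fun x => (p.1, x)))).map (fun q => q.2)
    = E.flatMap (fun p => p.2) := by
  induction E with
  | nil => rfl
  | cons p T ih => simp only [List.flatMap_cons, List.map_append, List.map_map, ih]; congr 1; simp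

lemma pvFlatMap_snd_enumerate (l : List (List String)) (s0 : Int) :
    (PySem.List.enumerate l s0).flatMap (fun p => p.2) = l.flatMap (fun x => x) := by
  induction l generalizing s0 with
  | nil => rfl
  | cons x t ih => simp [PySem.List.enumerate_cons, ih]

-- ===== VERDICT (by name: the statement is the Claim_ definition above) =====
theorem extractStatistics_spec : Claim_equal_extractStatistics := by
  intro document _
  unfold Spec_extractStatistics extractStatistics extractStatistics_alt
  dsimp only
  set d := PySem.Dict.ofList document with hd
  have hnd : d.keys.Nodup := PySem.Dict.nodup_keys_ofList document
  -- A's outer loop: range over indices → enumerate of keys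
  have h1 := pvFoldl_range_eq_enumerate d.keys 0
      (fun st i key =>
        (d.getD key []).foldl
          (fun st2 synset =>
            if st2.1.contains synset then
              (st2.1.modify synset 0 (· + 1), st2.2.modify synset [] (· ++ [i]))
            else
              (st2.1.insert synset 1, st2.2.insert synset [i]))
          st)
      ((PySem.Dict.empty, PySem.Dict.empty) : PySem.Dict String Int × PySem.Dict String (List Int))
  simp only [zero_add, sub_zero] at h1
  rw [h1]
  have hkeys : d.keys = d.items.map (fun x => x.1) := rfl
  have hvals : d.values = d.items.map (fun x => x.2) := rfl
  rw [hkeys, pvEnumerate_map, List.foldl_map]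
  -- replace the lookup d.getD key [] by the item's value
  rw [PySem.List.foldl_congr_mem _ _
    (fun st (p : Int × (String × List String)) => p.2.2.foldl
      (fun st2 synset =>
        if st2.1.contains synset then
          (st2.1.modify synset 0 (· + 1), st2.2.modify synset [] (· ++ [p.1]))
        else
          (st2.1.insert synset 1, st2.2.insert synset [p.1]))
      st) _
    (by
      intro acc p hp
      have hmem : p.2 ∈ d.items := pvSnd_mem_of_mem_enumerate hp
      have : d.getD p.2.1 [] = p.2.2 := by
        have : (p.2.1, p.2.2) ∈ d.items := by simpa using hmem
        exact PySem.Dict.getD_of_mem_items d this hnd []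
      rw [this])]
  -- A's two-dict fold = (map-length of O.items, O.items) for the occurrence-only fold O
  have h2 := pvOuter_fold (PySem.List.enumerate d.items) PySem.Dict.empty
  simp only [show (PySem.Dict.empty : PySem.Dict String (List Int)).items.map pvMapLen = [] from rfl] at h2
  rw [show (PySem.Dict.mk [] : PySem.Dict String Int) = PySem.Dict.empty from rfl] at h2
  rw [h2]
  -- the occurrence fold over enumerate items = grouping fold over enumerate values
  have hEfold :
      (PySem.List.enumerate d.items).foldl
        (fun o p => p.2.2.foldl (fun o synset => o.modify synset [] (· ++ [p.1])) o)
        (PySem.Dict.empty : PySem.Dict String (List Int))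
      = (PySem.List.enumerate d.values).foldl
        (fun o p => p.2.foldl (fun o synset => o.modify synset [] (· ++ [p.1])) o)
        (PySem.Dict.empty : PySem.Dict String (List Int)) := by
    rw [hvals, pvEnumerate_map, List.foldl_map]
  rw [hEfold]
  -- flatten the nested fold into a fold over (doc_idx, synset) pairs
  have hflat :
      (PySem.List.enumerate d.values).foldl
        (fun o p => p.2.foldl (fun o synset => o.modify synset [] (· ++ [p.1])) o)
        (PySem.Dict.empty : PySem.Dict String (List Int))
      = ((PySem.List.enumerate d.values).flatMap (fun p => p.2.map (fun x => (p.1, x)))).foldl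
          (fun o q => o.modify q.2 [] (· ++ [q.1])) PySem.Dict.empty := by
    rw [List.foldl_flatMap]
    congr 1
    funext o p
    rw [List.foldl_map]
  rw [hflat]
  -- characterise its items per distinct synset
  have hit := pvG_items
    ((PySem.List.enumerate d.values).flatMap (fun p => p.2.map (fun x => (p.1, x))))
    PySem.Dict.empty (by simp [PySem.Dict.keys, PySem.Dict.empty])
  have hnewnil : pvNew ((PySem.List.enumerate d.values).flatMap (fun p => p.2.map (fun x => (p.1, x))))
      (PySem.Dict.empty : PySem.Dict String (List Int)).keys
      = PySem.List.dedup
        (((PySem.List.enumerate d.values).flatMap (fun p => p.2.map (fun x => (p.1, x)))).map (fun q => q.2)) := by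
    simp [pvNew, PySem.Dict.keys, PySem.Dict.empty]
  rw [hnewnil] at hit
  simp only [show (PySem.Dict.empty : PySem.Dict String (List Int)).items = [] from rfl,
    List.map_nil, List.nil_append] at hit
  rw [hit]
  have horder : ((PySem.List.enumerate d.values).flatMap (fun p => p.2.map (fun x => (p.1, x)))).map (fun q => q.2)
      = d.values.flatMap (fun syns => syns) := by
    rw [pvMap_snd_flatMap, pvFlatMap_snd_enumerate]
  rw [horder]
  refine Prod.ext ?_ (Prod.ext ?_ rfl)
  · -- frequency component
    rw [List.map_map]
    apply List.map_congr_left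
    intro s _
    simp only [Function.comp_apply, pvMapLen]
    rw [pvOcc_flatMap, pvLen_flatMap_rep]
    congr 1
    have hmm : ((PySem.List.enumerate d.values).map (fun p => p.2)).map
        (fun syns => ((PySem.List.count syns s : Nat) : Int))
        = (PySem.List.enumerate d.values).map (fun p => ((PySem.List.count p.2 s : Nat) : Int)) := by
      rw [List.map_map]
      rfl
    rw [← hmm, PySem.List.map_snd_enumerate]
  · -- occurrence component
    apply List.map_congr_left
    intro s _
    rw [pvOcc_flatMap]
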